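-- pv_equiv track=rewrite | github.com/aefskysa/adventofcode | 2020/code/day6.py | separate_input_into_groups
-- ===== SOURCE A (Python) =====
-- def separate_input_into_groups(all_responses):
--     list_of_lists = []
--     tmp_list = []
--     for idx, row in enumerate(all_responses):
--         if idx == len(all_responses) - 1:
--             continue
--         if row == '':
--             list_of_lists.append(tmp_list)
--             tmp_list = []
--             continue
--         tmp_list.append(row)
--     list_of_lists.append(tmp_list)
--
--     return list_of_lists
-- ===== SOURCE B (Python) =====
-- def _split(rows):
--     # recursive split on the first blank row; keeps empty groups
--     if '' not in rows:
--         return [rows]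
--     i = rows.index('')
--     return [rows[:i]] + _split(rows[i + 1:])
--
--
-- def separate_input_into_groups(all_responses):
--     return _split(all_responses[:-1])
-- ===== Notes on version B (the rewrite author's own statement) =====
-- stated objective: alternative
-- what changed: Replaces A's single accumulate-into-tmp-buffer loop (with an index test skipping the last row) by a [:-1] slice followed by a recursive split that locates the first blank row with index() and slices the group out, recursing on the remainder.
import Mathlib
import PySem

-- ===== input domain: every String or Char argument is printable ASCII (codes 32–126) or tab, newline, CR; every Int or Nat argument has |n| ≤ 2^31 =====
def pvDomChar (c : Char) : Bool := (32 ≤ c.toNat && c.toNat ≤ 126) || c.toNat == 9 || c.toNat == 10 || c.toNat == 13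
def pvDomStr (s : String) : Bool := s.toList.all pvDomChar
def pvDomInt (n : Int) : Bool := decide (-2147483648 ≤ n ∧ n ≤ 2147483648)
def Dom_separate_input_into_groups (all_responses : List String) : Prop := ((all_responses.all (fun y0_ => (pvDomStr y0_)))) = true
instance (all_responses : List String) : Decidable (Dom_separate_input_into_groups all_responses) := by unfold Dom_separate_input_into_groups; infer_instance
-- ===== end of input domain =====

-- B replaces A's accumulate-into-a-buffer loop by a [:-1] slice plus a recursive
-- split at the first blank row (index() + slices); alternative decomposition, same cost.


-- ===== PORT A =====
-- literal port: enumerate-fold carrying (list_of_lists, tmp_list), skipping idx == len-1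
def separate_input_into_groups (all_responses : List String) : List (List String) :=
  let st := (PySem.List.enumerate all_responses).foldl
    (fun (s : List (List String) × List String) p =>
      if p.1 = (all_responses.length : Int) - 1 then s
      else if p.2 = "" then (s.1 ++ [s.2], [])
      else (s.1, s.2 ++ [p.2])) ([], [])
  st.1 ++ [st.2]

-- ===== PORT B =====
-- port of Source B's _split: first blank row via index(), slice the group, recurse on the rest
-- (rows[:i] = take i and rows[i+1:] = drop (i+1): exact for the nonnegative in-range i index() returns)
def pvSplitB (rows : List String) : List (List String) :=
  if h : "" ∈ rows then
    rows.take (rows.idxOf "") :: pvSplitB (rows.drop (rows.idxOf "" + 1))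
  else [rows]
termination_by rows.length
decreasing_by
  have hk := List.idxOf_lt_length_of_mem h
  simp only [List.length_drop]; omega

def separate_input_into_groups_alt (all_responses : List String) : List (List String) :=
  pvSplitB (PySem.List.slice all_responses none (some (-1)))   -- all_responses[:-1]

-- ===== PRECONDITION & SPEC =====
def Spec_separate_input_into_groups (all_responses : List String) (out : List (List String)) : Prop := out = separate_input_into_groups_alt all_responses
instance (all_responses : List String) (out : List (List String)) : Decidable (Spec_separate_input_into_groups all_responses out) := by unfold Spec_separate_input_into_groups; infer_instance

-- ===== CLAIM (what is proved, stated in full; the proofs are below) =====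
def Claim_equal_separate_input_into_groups : Prop := ∀ (all_responses : List String), Dom_separate_input_into_groups all_responses → Spec_separate_input_into_groups all_responses (separate_input_into_groups all_responses)

-- ===== LEMMAS AND PROOFS =====

-- A's loop body on the non-skipped, non-last rows
def pvStep (s : List (List String) × List String) (r : String) : List (List String) × List String :=
  if r = "" then (s.1 ++ [s.2], []) else (s.1, s.2 ++ [r])

-- prefix the first group of a nonempty group list
def pvConsHead (tmp : List String) : List (List String) → List (List String)
  | [] => [tmp]
  | h :: t => (tmp ++ h) :: t

theorem pvSplitB_ne_nil (rows : List String) : pvSplitB rows ≠ [] := by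
  rw [pvSplitB]
  by_cases h : "" ∈ rows <;> simp [h]

theorem pvConsHead_nil_of_ne (l : List (List String)) (h : l ≠ []) : pvConsHead [] l = l := by
  cases l with
  | nil => exact absurd rfl h
  | cons a t => simp [pvConsHead]

theorem pvConsHead_consHead (a b : List String) (l : List (List String)) (h : l ≠ []) :
    pvConsHead a (pvConsHead b l) = pvConsHead (a ++ b) l := by
  cases l with
  | nil => exact absurd rfl h
  | cons x t => simp [pvConsHead]

theorem pvSplitB_nil : pvSplitB [] = [[]] := by
  rw [pvSplitB]; simp

theorem pvSplitB_blank_cons (rest : List String) : pvSplitB ("" :: rest) = [] :: pvSplitB rest := by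
  rw [pvSplitB]
  simp [List.idxOf_cons_self]

theorem pvSplitB_cons_of_ne (r : String) (rest : List String) (hr : r ≠ "") :
    pvSplitB (r :: rest) = pvConsHead [r] (pvSplitB rest) := by
  rw [pvSplitB]
  conv_rhs => rw [pvSplitB]
  by_cases h : "" ∈ rest
  · have hmem : "" ∈ r :: rest := List.mem_cons_of_mem r h
    rw [dif_pos hmem, dif_pos h]
    have hidx : (r :: rest).idxOf "" = rest.idxOf "" + 1 :=
      List.idxOf_cons_ne rest hr
    rw [hidx]
    simp [pvConsHead, List.take_succ_cons, List.drop_succ_cons]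
  · have hmem : "" ∉ r :: rest := by simp [h, Ne.symm hr]
    rw [dif_neg hmem, dif_neg h]
    simp [pvConsHead]

-- loop invariant: A's buffer fold, started at (acc, tmp), produces acc ++ (tmp glued onto B's split)
theorem pvFold_inv (rows : List String) : ∀ acc tmp,
    ((rows.foldl pvStep (acc, tmp)).1 ++ [(rows.foldl pvStep (acc, tmp)).2])
      = acc ++ pvConsHead tmp (pvSplitB rows) := by
  induction rows with
  | nil => intro acc tmp; simp [pvSplitB_nil, pvConsHead]
  | cons r rest ih =>
    intro acc tmp
    by_cases hr : r = ""
    · subst hr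
      simp only [List.foldl_cons]
      rw [show pvStep (acc, tmp) "" = (acc ++ [tmp], ([] : List String)) from by
        simp [pvStep]]
      rw [ih, pvSplitB_blank_cons,
        pvConsHead_nil_of_ne _ (pvSplitB_ne_nil rest)]
      simp [pvConsHead]
    · simp only [List.foldl_cons, pvStep, if_neg hr]
      rw [ih, pvSplitB_cons_of_ne r rest hr,
        pvConsHead_consHead _ _ _ (pvSplitB_ne_nil rest)]

-- the enumerate-fold with the "skip index n" guard never fires when all indices stay below n
theorem pvEnumFold_noskip (n : Int) : ∀ (ys : List String) (start : Int)
    (h : start + ys.length ≤ n) (init : List (List String) × List String),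
    (PySem.List.enumerate ys start).foldl
      (fun (s : List (List String) × List String) p =>
        if p.1 = n then s
        else if p.2 = "" then (s.1 ++ [s.2], [])
        else (s.1, s.2 ++ [p.2])) init
      = ys.foldl pvStep init := by
  intro ys
  induction ys with
  | nil => intro start h init; simp [PySem.List.enumerate]
  | cons y t ih =>
    intro start h init
    rw [PySem.List.enumerate_cons]
    simp only [List.foldl_cons]
    have hlt : start ≠ n := by
      simp only [List.length_cons] at h; push_cast at h; omega
    rw [if_neg hlt]
    have ht : (start + 1) + (t.length : Int) ≤ n := by
      simp only [List.length_cons] at h; push_cast at h ⊢; omega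
    rw [ih (start + 1) ht]
    rfl

-- A's whole fold = plain pvStep fold over dropLast (the skipped index is exactly the last row)
theorem pvFoldA_eq_dropLast (xs : List String) (init : List (List String) × List String) :
    (PySem.List.enumerate xs).foldl
      (fun (s : List (List String) × List String) p =>
        if p.1 = (xs.length : Int) - 1 then s
        else if p.2 = "" then (s.1 ++ [s.2], [])
        else (s.1, s.2 ++ [p.2])) init
      = xs.dropLast.foldl pvStep init := by
  rcases List.eq_nil_or_concat xs with rfl | ⟨ys, a, rfl⟩
  · simp [PySem.List.enumerate]
  · rw [List.concat_eq_append]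
    rw [PySem.List.enumerate_append]
    rw [List.foldl_append]
    rw [pvEnumFold_noskip ((↑(ys ++ [a]).length : Int) - 1) ys 0
      (by simp) init]
    have hlast : ((0 : Int) + ys.length) = ((ys ++ [a]).length : Int) - 1 := by
      simp
    rw [PySem.List.enumerate_cons, PySem.List.enumerate_nil]
    simp only [List.foldl_cons, List.foldl_nil]
    rw [if_pos hlast]
    rw [show (ys ++ [a]).dropLast = ys from by simp]

-- ===== VERDICT (by name: the statement is the Claim_ definition above) =====
theorem separate_input_into_groups_spec : Claim_equal_separate_input_into_groups := by
  intro xs _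
  unfold Spec_separate_input_into_groups separate_input_into_groups separate_input_into_groups_alt
  rw [PySem.List.slice_to_neg_one]
  simp only []
  rw [pvFoldA_eq_dropLast xs ([], [])]
  rw [pvFold_inv xs.dropLast [] []]
  simp [pvConsHead_nil_of_ne _ (pvSplitB_ne_nil xs.dropLast)]
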